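-- pv_equiv track=rewrite | github.com/spectrochempy/spectrochempy | spectrochempy/utils/nmrglue.py | index2trace_reg
-- ===== SOURCE A (Python) =====
-- from functools import reduce
--
-- def index2trace_flat(shape, index):
--     """
--     Calculate trace number from shape and index of all indirect dimensions
--     assuming a flat structure
--     """
--     # We need to perform:
--     # index[0]*shape[1]*...shape[-1] + index[1]*shape[2]*...shape[-1] + ...
--     # + index[-1]*shape[-1] + index[-1]
--     # To do this we calculate the product of shape[X] elements and multiple
--     # by the corresponding index element, index[-1] as added at the beginning
--     a = index[-1]
--     for i, v in enumerate(index[:-1]):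
--         mult = reduce(lambda x, y: x * y, shape[i + 1 :])
--         a = a + mult * v
--     return a
--
-- def index2trace_reg(shape, index):
--     """
--     Calculate trace number from shape and index of all indirect dimensions
--     assuming the same  phase and time ordering.
--     """
--     n = len(shape)
--     # deal with the phase component
--     phases = [v % 2 for v in index]
--     nphase = index2trace_flat([2] * n, phases)
--     # deal with the remainder
--     pindex = [v // 2 for v in index]
--     pshape = [i // 2 for i in shape]
--     nbase = index2trace_flat(pshape, pindex)
--     return nbase * 2 ** n + nphase
-- ===== SOURCE B (Python) =====
-- def index2trace_reg(shape, index):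
--     """
--     Calculate trace number from shape and index of all indirect dimensions
--     assuming the same phase and time ordering.
--
--     Single reverse pass that maintains the running suffix products (of the
--     halved shape and of the power of two for the phase part) instead of
--     recomputing a product with reduce() at every position.
--     """
--     n = len(shape)
--     m = len(index)
--     pb = 1  # product of s // 2 over shape[m-1:]
--     pp = 1  # 2 ** len(shape[m-1:])
--     for s in shape[m - 1:]:
--         pb *= s // 2
--         pp *= 2
--     base = index[m - 1] // 2
--     phase = index[m - 1] % 2
--     for i in range(m - 2, -1, -1):
--         base += (index[i] // 2) * pb
--         phase += (index[i] % 2) * pp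
--         pb *= shape[i] // 2
--         pp *= 2
--     return base * 2 ** n + phase
-- ===== Notes on version B (the rewrite author's own statement) =====
-- stated objective: faster
-- what changed: Replaces the two index2trace_flat passes that recompute a suffix product with reduce() at every position by one fused reverse loop that maintains both suffix products (halved shape and power of two) incrementally.
import Mathlib
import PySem

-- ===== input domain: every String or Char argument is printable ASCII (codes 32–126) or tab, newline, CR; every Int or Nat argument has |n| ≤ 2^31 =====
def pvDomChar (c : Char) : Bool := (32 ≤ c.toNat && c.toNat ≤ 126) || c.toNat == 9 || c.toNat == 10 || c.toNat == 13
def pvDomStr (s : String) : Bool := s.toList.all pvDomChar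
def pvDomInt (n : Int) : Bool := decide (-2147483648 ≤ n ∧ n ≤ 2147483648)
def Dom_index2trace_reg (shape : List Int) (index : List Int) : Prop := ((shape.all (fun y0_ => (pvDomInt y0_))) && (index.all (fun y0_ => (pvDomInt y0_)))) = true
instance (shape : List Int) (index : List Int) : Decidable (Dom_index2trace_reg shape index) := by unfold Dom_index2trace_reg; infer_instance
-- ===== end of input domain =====

-- B replaces A's repeated reduce()-computed suffix products by one fused reverse pass
-- that maintains both suffix products incrementally (return-value equivalence on Pre_).

-- ===== PORT A =====
-- reduce(lambda x, y: x * y, xs)  (Python raises on empty xs; Pre_ keeps such calls nonempty)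
def reduceMul (xs : List Int) : Int :=
  match xs with
  | [] => 0
  | h :: t => t.foldl (· * ·) h

def index2trace_flat (shape : List Int) (index : List Int) : Int :=
  let a := PySem.List.pyGetD index (-1) 0
  (PySem.List.enumerate (PySem.List.slice index none (some (-1))) 0).foldl
    (fun a iv => a + reduceMul (PySem.List.slice shape (some (iv.1 + 1)) none) * iv.2) a

def index2trace_reg (shape : List Int) (index : List Int) : Int :=
  let n := shape.length
  let phases := index.map (fun v => PySem.Int.mod v 2)
  let nphase := index2trace_flat (List.replicate n 2) phases
  let pindex := index.map (fun v => PySem.Int.floordiv v 2)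
  let pshape := shape.map (fun i => PySem.Int.floordiv i 2)
  let nbase := index2trace_flat pshape pindex
  nbase * 2 ^ n + nphase

-- ===== PORT B =====
def index2trace_reg_alt (shape : List Int) (index : List Int) : Int :=
  let n := shape.length
  let m := index.length
  let pbpp := (PySem.List.slice shape (some ((m : Int) - 1)) none).foldl
      (fun (p : Int × Int) s => (p.1 * PySem.Int.floordiv s 2, p.2 * 2)) (1, 1)
  let last := PySem.List.pyGetD index ((m : Int) - 1) 0
  let st := (PySem.List.pyRange ((m : Int) - 2) (-1) (-1)).foldl
      (fun (st : Int × Int × Int × Int) i =>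
        let xi := PySem.List.pyGetD index i 0
        let si := PySem.List.pyGetD shape i 0
        (st.1 + PySem.Int.floordiv xi 2 * st.2.2.1,
         st.2.1 + PySem.Int.mod xi 2 * st.2.2.2,
         st.2.2.1 * PySem.Int.floordiv si 2,
         st.2.2.2 * 2))
      (PySem.Int.floordiv last 2, PySem.Int.mod last 2, pbpp.1, pbpp.2)
  st.1 * 2 ^ n + st.2.1

-- ===== PRECONDITION & SPEC =====
-- Pre_ excludes exactly the inputs on which Python A raises: an empty index
-- (IndexError on index[-1]) and an index of two or more entries longer than
-- shape (TypeError: reduce() of an empty slice shape[i+1:]).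
def Pre_index2trace_reg (shape : List Int) (index : List Int) : Prop :=
  index ≠ [] ∧ (index.length = 1 ∨ index.length ≤ shape.length)
instance (shape : List Int) (index : List Int) : Decidable (Pre_index2trace_reg shape index) := by unfold Pre_index2trace_reg; infer_instance

def pvWitness_index2trace_reg : List Int × List Int := ([6, 4, 8], [3, 1])

def Spec_index2trace_reg (shape : List Int) (index : List Int) (out : Int) : Prop := out = index2trace_reg_alt shape index
instance (shape : List Int) (index : List Int) (out : Int) : Decidable (Spec_index2trace_reg shape index out) := by unfold Spec_index2trace_reg; infer_instance

-- ===== CLAIM (what is proved, stated in full; the proofs are below) =====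
def Claim_equal_index2trace_reg : Prop := ∀ (shape : List Int) (index : List Int), Dom_index2trace_reg shape index → Pre_index2trace_reg shape index → Spec_index2trace_reg shape index (index2trace_reg shape index)

-- ===== LEMMAS AND PROOFS =====

-- product of a list of integers
def pvProd (xs : List Int) : Int := xs.foldl (· * ·) 1

-- the common mathematical shape of both loops:
-- pvF sh ix = ix[0]*prod(sh[1:]) + ix[1]*prod(sh[2:]) + … + ix[-1]
def pvF : List Int → List Int → Int
  | _, [] => 0
  | _, [x] => x
  | sh, x :: y :: rest => x * pvProd sh.tail + pvF sh.tail (y :: rest)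

theorem pvFoldlMul (t : List Int) (a : Int) : t.foldl (· * ·) a = a * t.foldl (· * ·) 1 := by
  induction t generalizing a with
  | nil => simp
  | cons h tl ih => simp only [List.foldl_cons]; rw [ih (a * h), ih (1 * h)]; ring

theorem reduceMul_eq (xs : List Int) (h : xs ≠ []) : reduceMul xs = pvProd xs := by
  cases xs with
  | nil => simp at h
  | cons a t => simp only [reduceMul, pvProd, List.foldl_cons, one_mul]

theorem pvEnumShift (l : List Int) (s : Int) :
    PySem.List.enumerate l (s + 1) = (PySem.List.enumerate l s).map (fun p => (p.1 + 1, p.2)) := by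
  induction l generalizing s with
  | nil => simp [PySem.List.enumerate_nil]
  | cons x xs ih => simp [PySem.List.enumerate_cons, ih]

theorem sliceShift (sh : List Int) (i : Int) (hi : 0 ≤ i) :
    PySem.List.slice sh (some (i + 1 + 1)) none = PySem.List.slice sh.tail (some (i + 1)) none := by
  rw [PySem.List.slice_from sh (show (0:Int) ≤ i + 1 + 1 by omega),
      PySem.List.slice_from sh.tail (show (0:Int) ≤ i + 1 by omega)]
  have h1 : (i + 1 + 1).toNat = (i + 1).toNat + 1 := by omega
  rw [h1, List.drop_tail]

theorem flatA_eq (ix : List Int) : ∀ (sh : List Int), ix ≠ [] → ix.length ≤ sh.length →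
    index2trace_flat sh ix = pvF sh ix := by
  induction ix with
  | nil => intro sh h _; simp at h
  | cons x rest ih =>
    intro sh _ hlen
    cases rest with
    | nil =>
      simp [index2trace_flat, pvF, PySem.List.slice_to_neg_one, PySem.List.enumerate_nil,
        PySem.List.pyGetD_neg_one ([x]) 0 (by simp)]
    | cons y rest2 =>
      have hlast : PySem.List.pyGetD (x :: y :: rest2) (-1) 0 = PySem.List.pyGetD (y :: rest2) (-1) 0 := by
        rw [PySem.List.pyGetD_neg_one _ 0 (by simp), PySem.List.pyGetD_neg_one _ 0 (by simp)]
        simp [List.getLast_cons]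
      have hdl : PySem.List.slice (x :: y :: rest2) none (some (-1)) = x :: (PySem.List.slice (y :: rest2) none (some (-1))) := by
        rw [PySem.List.slice_to_neg_one, PySem.List.slice_to_neg_one]
        simp
      simp only [index2trace_flat, hdl, hlast, PySem.List.enumerate_cons, List.foldl_cons]
      rw [pvEnumShift, List.foldl_map, PySem.List.foldl_add]
      have ihr := ih sh.tail (by simp) (by simp at hlen ⊢; omega)
      simp only [index2trace_flat, PySem.List.foldl_add] at ihr
      have hcong : ∀ p ∈ PySem.List.enumerate (PySem.List.slice (y :: rest2) none (some (-1))) 0,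
          (fun q : Int × Int => reduceMul (PySem.List.slice sh (some ((q.1 + 1, q.2).1 + 1)) none) * (q.1 + 1, q.2).2) p
          = (fun q : Int × Int => reduceMul (PySem.List.slice sh.tail (some (q.1 + 1)) none) * q.2) p := by
        intro p hp
        rcases (PySem.List.mem_enumerate_iff _ _ _).1 hp with ⟨k, hk, rfl⟩
        simp only []
        rw [sliceShift sh _ (by positivity)]
      rw [List.map_congr_left hcong]
      have h2 : sh.tail ≠ [] := by
        cases sh with
        | nil => simp at hlen
        | cons a t =>
          simp only [List.tail_cons]
          intro h; subst h; simp at hlen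
      have hred : reduceMul (PySem.List.slice sh (some ((0:Int) + 1)) none) = pvProd sh.tail := by
        rw [show ((0:Int) + 1) = 1 by norm_num, PySem.List.slice_from_one, reduceMul_eq _ h2]
      rw [pvF]
      -- arithmetic finish
      rw [hred] at *
      linarith [ihr]

theorem pvProd_replicate (k : Nat) : pvProd (List.replicate k 2) = 2 ^ k := by
  induction k with
  | zero => simp [pvProd]
  | succ n ih =>
    rw [List.replicate_succ]
    rw [show pvProd (2 :: List.replicate n 2) = 2 * pvProd (List.replicate n 2) by
      simp only [pvProd, List.foldl_cons, one_mul]; exact pvFoldlMul _ 2, ih]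
    ring

theorem pvProd_cons (x : Int) (l : List Int) : pvProd (x :: l) = x * pvProd l := by
  simp only [pvProd, List.foldl_cons, one_mul]; exact pvFoldlMul l x

theorem altInv (shape index : List Int) (j : Nat)
    (hj : j ≤ index.length - 1) (hne : index ≠ []) (hlen : index.length ≤ shape.length) :
    (PySem.List.pyRange ((j : Int) - 1) (-1) (-1)).foldl
      (fun (st : Int × Int × Int × Int) i =>
        let xi := PySem.List.pyGetD index i 0
        let si := PySem.List.pyGetD shape i 0
        (st.1 + PySem.Int.floordiv xi 2 * st.2.2.1,
         st.2.1 + PySem.Int.mod xi 2 * st.2.2.2,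
         st.2.2.1 * PySem.Int.floordiv si 2,
         st.2.2.2 * 2))
      (pvF ((shape.map (fun v => PySem.Int.floordiv v 2)).drop j) ((index.map (fun v => PySem.Int.floordiv v 2)).drop j),
       pvF (List.replicate (shape.length - j) 2) ((index.map (fun v => PySem.Int.mod v 2)).drop j),
       pvProd ((shape.map (fun v => PySem.Int.floordiv v 2)).drop j),
       2 ^ (shape.length - j)) =
    (pvF (shape.map (fun v => PySem.Int.floordiv v 2)) (index.map (fun v => PySem.Int.floordiv v 2)),
     pvF (List.replicate shape.length 2) (index.map (fun v => PySem.Int.mod v 2)),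
     pvProd (shape.map (fun v => PySem.Int.floordiv v 2)),
     2 ^ shape.length) := by
  induction j with
  | zero =>
    rw [PySem.List.pyRange_neg_one_eq_nil (by norm_num)]
    simp
  | succ k ih =>
    have hm : 1 ≤ index.length := by
      cases index with | nil => exact absurd rfl hne | cons a t => simp
    have hk2 : k + 1 ≤ index.length - 1 := hj
    have hkm : k < index.length := by omega
    have hkn : k < shape.length := by omega
    have hk1m : k + 1 < index.length := by omega
    have hcast : ((k + 1 : Nat) : Int) - 1 = (k : Int) := by push_cast; ring
    rw [hcast, PySem.List.pyRange_neg_one_cons (by omega), List.foldl_cons]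
    have hstep :
        (fun (st : Int × Int × Int × Int) i =>
          let xi := PySem.List.pyGetD index i 0
          let si := PySem.List.pyGetD shape i 0
          (st.1 + PySem.Int.floordiv xi 2 * st.2.2.1,
           st.2.1 + PySem.Int.mod xi 2 * st.2.2.2,
           st.2.2.1 * PySem.Int.floordiv si 2,
           st.2.2.2 * 2))
        (pvF ((shape.map (fun v => PySem.Int.floordiv v 2)).drop (k+1)) ((index.map (fun v => PySem.Int.floordiv v 2)).drop (k+1)),
         pvF (List.replicate (shape.length - (k+1)) 2) ((index.map (fun v => PySem.Int.mod v 2)).drop (k+1)),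
         pvProd ((shape.map (fun v => PySem.Int.floordiv v 2)).drop (k+1)),
         2 ^ (shape.length - (k+1))) ((k : Nat) : Int) =
        (pvF ((shape.map (fun v => PySem.Int.floordiv v 2)).drop k) ((index.map (fun v => PySem.Int.floordiv v 2)).drop k),
         pvF (List.replicate (shape.length - k) 2) ((index.map (fun v => PySem.Int.mod v 2)).drop k),
         pvProd ((shape.map (fun v => PySem.Int.floordiv v 2)).drop k),
         2 ^ (shape.length - k)) := by
      have hgx : PySem.List.pyGetD index ((k : Nat) : Int) 0 = index[k] := by
        rw [PySem.List.pyGetD_eq_getElem index 0 (by positivity) (by exact_mod_cast hkm)]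
        simp
      have hgs : PySem.List.pyGetD shape ((k : Nat) : Int) 0 = shape[k] := by
        rw [PySem.List.pyGetD_eq_getElem shape 0 (by positivity) (by exact_mod_cast hkn)]
        simp
      have hdropix : ((index.map (fun v => PySem.Int.floordiv v 2)).drop k)
          = PySem.Int.floordiv index[k] 2 :: ((index.map (fun v => PySem.Int.floordiv v 2)).drop (k+1)) := by
        rw [List.drop_eq_getElem_cons (by simpa using hkm)]
        simp
      have hdroppx : ((index.map (fun v => PySem.Int.mod v 2)).drop k)
          = PySem.Int.mod index[k] 2 :: ((index.map (fun v => PySem.Int.mod v 2)).drop (k+1)) := by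
        rw [List.drop_eq_getElem_cons (by simpa using hkm)]
        simp
      have hdropsh : ((shape.map (fun v => PySem.Int.floordiv v 2)).drop k)
          = PySem.Int.floordiv shape[k] 2 :: ((shape.map (fun v => PySem.Int.floordiv v 2)).drop (k+1)) := by
        rw [List.drop_eq_getElem_cons (by simpa using hkn)]
        simp
      have hrep : List.replicate (shape.length - k) 2 = (2 : Int) :: List.replicate (shape.length - (k+1)) 2 := by
        rw [show shape.length - k = (shape.length - (k+1)) + 1 by omega, List.replicate_succ]
      have hixtail : ((index.map (fun v => PySem.Int.floordiv v 2)).drop (k+1)) ≠ [] := by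
        simp only [ne_eq, List.drop_eq_nil_iff, List.length_map]
        omega
      obtain ⟨w, ws, hws⟩ : ∃ w ws, ((index.map (fun v => PySem.Int.floordiv v 2)).drop (k+1)) = w :: ws := by
        cases h : ((index.map (fun v => PySem.Int.floordiv v 2)).drop (k+1)) with
        | nil => exact absurd h hixtail
        | cons a t => exact ⟨a, t, rfl⟩
      obtain ⟨w2, ws2, hws2⟩ : ∃ w ws, ((index.map (fun v => PySem.Int.mod v 2)).drop (k+1)) = w :: ws := by
        cases h : ((index.map (fun v => PySem.Int.mod v 2)).drop (k+1)) with
        | nil =>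
          exfalso
          have := congrArg List.length h
          simp only [List.length_drop, List.length_map, List.length_nil] at this
          omega
        | cons a t => exact ⟨a, t, rfl⟩
      simp only [hgx, hgs]
      rw [hdropix, hdroppx, hdropsh, hrep, hws, hws2]
      rw [pvF, pvF]
      simp only [List.tail_cons, pvProd_cons, pvProd_replicate]
      refine Prod.ext ?_ (Prod.ext ?_ (Prod.ext ?_ ?_))
      · simp only []; ring
      · simp only []; ring
      · simp only []; ring
      · simp only []
        rw [show shape.length - k = (shape.length - (k+1)) + 1 by omega, pow_succ]
    exact (congrArg (fun st : Int × Int × Int × Int => List.foldl (fun (st : Int × Int × Int × Int) i =>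
      let xi := PySem.List.pyGetD index i 0
      let si := PySem.List.pyGetD shape i 0
      (st.1 + PySem.Int.floordiv xi 2 * st.2.2.1,
       st.2.1 + PySem.Int.mod xi 2 * st.2.2.2,
       st.2.2.1 * PySem.Int.floordiv si 2,
       st.2.2.2 * 2)) st (PySem.List.pyRange ((k : Int) - 1) (-1) (-1))) hstep).trans (ih (by omega))

theorem pvPairFold (l : List Int) (a b : Int) :
    l.foldl (fun (p : Int × Int) s => (p.1 * PySem.Int.floordiv s 2, p.2 * 2)) (a, b)
    = (l.foldl (fun x s => x * PySem.Int.floordiv s 2) a, b * 2 ^ l.length) := by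
  induction l generalizing a b with
  | nil => simp
  | cons h t ih =>
    simp only [List.foldl_cons, ih, List.length_cons]
    refine Prod.ext rfl ?_
    simp only []
    rw [pow_succ]
    ring

theorem mainEq (shape index : List Int) (hne : index ≠ []) (hlen : index.length ≤ shape.length) :
    index2trace_reg shape index = index2trace_reg_alt shape index := by
  have hm : 1 ≤ index.length := by
    cases index with | nil => exact absurd rfl hne | cons a t => simp
  -- A side
  have hA : index2trace_reg shape index
      = pvF (shape.map (fun v => PySem.Int.floordiv v 2)) (index.map (fun v => PySem.Int.floordiv v 2)) * 2 ^ shape.length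
        + pvF (List.replicate shape.length 2) (index.map (fun v => PySem.Int.mod v 2)) := by
    show index2trace_flat (shape.map (fun v => PySem.Int.floordiv v 2)) (index.map (fun v => PySem.Int.floordiv v 2)) * 2 ^ shape.length
        + index2trace_flat (List.replicate shape.length 2) (index.map (fun v => PySem.Int.mod v 2)) = _
    rw [flatA_eq _ _ (by simpa using hne) (by simpa using hlen),
        flatA_eq _ _ (by simpa using hne) (by simp; omega)]
  -- B side pieces
  have hc1 : ((index.length : Int) - 1) = ((index.length - 1 : Nat) : Int) := by omega
  have hslice : PySem.List.slice shape (some ((index.length : Int) - 1)) none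
      = shape.drop (index.length - 1) := by
    rw [hc1, PySem.List.slice_from_natCast]
  have hlast : PySem.List.pyGetD index ((index.length : Int) - 1) 0 = index[index.length - 1] := by
    rw [PySem.List.pyGetD_eq_getElem index 0 (by omega) (by omega)]
    congr 1
    omega
  have hdropix : (index.map (fun v => PySem.Int.floordiv v 2)).drop (index.length - 1)
      = [PySem.Int.floordiv index[index.length - 1] 2] := by
    rw [List.drop_eq_getElem_cons (by simp; omega)]
    have : (index.map (fun v => PySem.Int.floordiv v 2)).drop (index.length - 1 + 1) = [] := by
      simp; omega
    rw [this]
    simp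
  have hdroppx : (index.map (fun v => PySem.Int.mod v 2)).drop (index.length - 1)
      = [PySem.Int.mod index[index.length - 1] 2] := by
    rw [List.drop_eq_getElem_cons (by simp; omega)]
    have : (index.map (fun v => PySem.Int.mod v 2)).drop (index.length - 1 + 1) = [] := by
      simp; omega
    rw [this]
    simp
  have hc2 : ((index.length : Int) - 2) = ((index.length - 1 : Nat) : Int) - 1 := by omega
  have hinv := altInv shape index (index.length - 1) (le_refl _) hne hlen
  rw [hdropix, hdroppx] at hinv
  have hB : index2trace_reg_alt shape index
      = pvF (shape.map (fun v => PySem.Int.floordiv v 2)) (index.map (fun v => PySem.Int.floordiv v 2)) * 2 ^ shape.length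
        + pvF (List.replicate shape.length 2) (index.map (fun v => PySem.Int.mod v 2)) := by
    simp only [index2trace_reg_alt]
    rw [hslice, hlast, hc2, pvPairFold]
    have hfold1 : (shape.drop (index.length - 1)).foldl (fun x s => x * PySem.Int.floordiv s 2) 1
        = pvProd ((shape.map (fun v => PySem.Int.floordiv v 2)).drop (index.length - 1)) := by
      rw [← List.map_drop, pvProd, List.foldl_map]
    have hlen1 : (shape.drop (index.length - 1)).length = shape.length - (index.length - 1) := by
      simp
    rw [hfold1, hlen1, one_mul]
    have hinit :
        (PySem.Int.floordiv index[index.length - 1] 2, PySem.Int.mod index[index.length - 1] 2,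
         pvProd ((shape.map (fun v => PySem.Int.floordiv v 2)).drop (index.length - 1)),
         (2 : Int) ^ (shape.length - (index.length - 1)))
        = (pvF ((shape.map (fun v => PySem.Int.floordiv v 2)).drop (index.length - 1)) [PySem.Int.floordiv index[index.length - 1] 2],
           pvF (List.replicate (shape.length - (index.length - 1)) 2) [PySem.Int.mod index[index.length - 1] 2],
           pvProd ((shape.map (fun v => PySem.Int.floordiv v 2)).drop (index.length - 1)),
           (2 : Int) ^ (shape.length - (index.length - 1))) := by
      rw [pvF, pvF]
    rw [hinit, hinv]
  rw [hA, hB]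

theorem flat_singleton (sh : List Int) (x : Int) : index2trace_flat sh [x] = x := by
  simp [index2trace_flat, PySem.List.slice_to_neg_one, PySem.List.enumerate_nil,
    PySem.List.pyGetD_neg_one ([x]) 0 (by simp)]

theorem mainEq1 (shape : List Int) (x : Int) :
    index2trace_reg shape [x] = index2trace_reg_alt shape [x] := by
  simp only [index2trace_reg, index2trace_reg_alt, List.map_cons, List.map_nil,
    List.length_cons, List.length_nil]
  rw [flat_singleton, flat_singleton]
  rw [show (((0:Nat) + 1 : Nat) : Int) - 2 = -1 by norm_num,
      PySem.List.pyRange_neg_one_eq_nil (by norm_num), List.foldl_nil]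
  rw [show (((0:Nat) + 1 : Nat) : Int) - 1 = 0 by norm_num, PySem.List.pyGetD_zero_cons]

-- ===== VERDICT (by name: the statement is the Claim_ definition above) =====
theorem index2trace_reg_spec : Claim_equal_index2trace_reg := by
  intro shape index _ hpre
  unfold Pre_index2trace_reg at hpre
  unfold Spec_index2trace_reg
  rcases hpre with ⟨hne, hd | hlen⟩
  · obtain ⟨x, hx⟩ : ∃ x, index = [x] := by
      cases index with
      | nil => simp at hd
      | cons a t =>
        cases t with
        | nil => exact ⟨a, rfl⟩
        | cons b u => simp at hd
    rw [hx]
    exact mainEq1 shape x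
  · exact mainEq shape index hne hlen
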